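-- pv_equiv track=rewrite | github.com/DimaPalamarchuk/Programming-Languages-And-Paradigms | Laboratorium1/Zadanie5.2.py | funkcyjne
-- ===== SOURCE A (Python) =====
-- def funkcyjne(zadania):
--     zadania = sorted(zadania, key=lambda x: x[1])
--     def zadanie(zadania):
--         maks_nagroda = 0
--         ostatni_koniec = 0
--         wybrane_zadania = []
--         for start, koniec, nagroda in zadania:
--             if start >= ostatni_koniec:
--                 wybrane_zadania.append((start, koniec, nagroda))
--                 maks_nagroda += nagroda
--                 ostatni_koniec = koniec
--         return maks_nagroda, wybrane_zadania
--     return zadanie(zadania)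
-- ===== SOURCE B (Python) =====
-- def funkcyjne(zadania):
--     def wybierz(posortowane, ostatni_koniec):
--         if not posortowane:
--             return []
--         start, koniec, nagroda = posortowane[0]
--         reszta = posortowane[1:]
--         if start >= ostatni_koniec:
--             return [(start, koniec, nagroda)] + wybierz(reszta, koniec)
--         return wybierz(reszta, ostatni_koniec)
--     wybrane = wybierz(sorted(zadania, key=lambda x: x[1]), 0)
--     return sum(n for _, _, n in wybrane), wybrane
-- ===== Notes on version B (the rewrite author's own statement) =====
-- stated objective: alternative
-- what changed: Replaced the imperative single pass with a triple accumulator (sum, last end, selected list) by a recursive select-then-sum decomposition: a recursion over the sorted list computes only the chosen tasks, and the reward sum is taken over that list afterwards.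
import Mathlib
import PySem

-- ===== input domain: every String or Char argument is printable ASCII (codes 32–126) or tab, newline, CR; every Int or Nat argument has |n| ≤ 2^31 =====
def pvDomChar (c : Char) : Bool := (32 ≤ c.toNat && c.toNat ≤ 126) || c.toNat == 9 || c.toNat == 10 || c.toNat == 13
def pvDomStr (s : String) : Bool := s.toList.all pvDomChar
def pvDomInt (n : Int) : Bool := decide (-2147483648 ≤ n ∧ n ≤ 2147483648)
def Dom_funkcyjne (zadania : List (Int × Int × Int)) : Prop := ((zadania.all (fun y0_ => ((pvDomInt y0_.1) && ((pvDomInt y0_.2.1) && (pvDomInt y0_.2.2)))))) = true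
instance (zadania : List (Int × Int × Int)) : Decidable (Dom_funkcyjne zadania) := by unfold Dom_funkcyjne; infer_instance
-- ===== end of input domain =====

-- B replaces A's imperative triple-accumulator pass by a recursive select-then-sum decomposition (alternative structure, same cost).


-- ===== PORT A =====
-- Port of A: sort by end, then one pass with accumulator (maks_nagroda, ostatni_koniec, wybrane_zadania).
def funkcyjne (zadania : List (Int × Int × Int)) : Int × (List (Int × Int × Int)) :=
  let posortowane := PySem.List.sorted zadania (fun x => x.2.1) false
  let r := posortowane.foldl
    (fun (st : Int × Int × List (Int × Int × Int)) t =>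
      if t.1 ≥ st.2.1 then (st.1 + t.2.2, t.2.1, st.2.2 ++ [t]) else st)
    (0, 0, [])
  (r.1, r.2.2)

-- ===== PORT B =====
-- Port of B: recursive selection over the sorted list, reward summed afterwards.
def wybierz : List (Int × Int × Int) → Int → List (Int × Int × Int)
  | [], _ => []
  | t :: reszta, ostatni_koniec =>
    if t.1 ≥ ostatni_koniec then t :: wybierz reszta t.2.1
    else wybierz reszta ostatni_koniec

def funkcyjne_alt (zadania : List (Int × Int × Int)) : Int × (List (Int × Int × Int)) :=
  let wybrane := wybierz (PySem.List.sorted zadania (fun x => x.2.1) false) 0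
  ((wybrane.map (fun t => t.2.2)).sum, wybrane)

-- ===== PRECONDITION & SPEC =====
def Spec_funkcyjne (zadania : List (Int × Int × Int)) (out : Int × (List (Int × Int × Int))) : Prop := out = funkcyjne_alt zadania
instance (zadania : List (Int × Int × Int)) (out : Int × (List (Int × Int × Int))) : Decidable (Spec_funkcyjne zadania out) := by unfold Spec_funkcyjne; infer_instance

-- ===== CLAIM (what is proved, stated in full; the proofs are below) =====
def Claim_equal_funkcyjne : Prop := ∀ (zadania : List (Int × Int × Int)), Dom_funkcyjne zadania → Spec_funkcyjne zadania (funkcyjne zadania)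

-- ===== LEMMAS AND PROOFS =====

-- ===== VERDICT (by name: the statement is the Claim_ definition above) =====
def krok (st : Int × Int × List (Int × Int × Int)) (t : Int × Int × Int) :
    Int × Int × List (Int × Int × Int) :=
  if t.1 ≥ st.2.1 then (st.1 + t.2.2, t.2.1, st.2.2 ++ [t]) else st

lemma foldl_eq_wybierz (l : List (Int × Int × Int)) :
    ∀ (m k : Int) (acc : List (Int × Int × Int)),
      (l.foldl krok (m, k, acc)).1 = m + ((wybierz l k).map (fun t => t.2.2)).sum ∧
      (l.foldl krok (m, k, acc)).2.2 = acc ++ wybierz l k := by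
  induction l with
  | nil => intro m k acc; simp [wybierz]
  | cons t reszta ih =>
    intro m k acc
    by_cases h : t.1 ≥ k
    · simpa [wybierz, krok, h, add_assoc] using ih (m + t.2.2) t.2.1 (acc ++ [t])
    · simpa [wybierz, krok, h] using ih m k acc

theorem funkcyjne_spec : Claim_equal_funkcyjne := by
  intro zadania _
  unfold Spec_funkcyjne funkcyjne funkcyjne_alt
  have h := foldl_eq_wybierz (PySem.List.sorted zadania (fun x => x.2.1) false) 0 0 []
  simp only [show (fun (st : Int × Int × List (Int × Int × Int)) t =>
      if t.1 ≥ st.2.1 then (st.1 + t.2.2, t.2.1, st.2.2 ++ [t]) else st) = krok from rfl]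
  simp [h.1, h.2]
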